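-- pv_equiv track=rewrite | github.com/tle46/CS-1301 | HW09.py | lengthDict
-- ===== SOURCE A (Python) =====
-- def lengthDict(nameList):
--     if len(nameList) == 0:
--         output = {}
--     else:
--         counter = 0
--         for char in nameList[0]:
--             if char.lower() in "bcdfghjklmnpqrstvwxyz":
--                 counter += 1
--         interDict = lengthDict(nameList[1:])
--         interDict[nameList[0]] = counter
--         output = interDict
--     return output
-- ===== SOURCE B (Python) =====
-- def lengthDict(nameList):
--     consonants = set("bcdfghjklmnpqrstvwxyz")
--     output = {}
--     for name in reversed(nameList):
--         output[name] = sum(1 for ch in name if ch.lower() in consonants)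
--     return output
-- ===== Notes on version B (the rewrite author's own statement) =====
-- stated objective: simpler
-- what changed: A's tail-recursion (recurse on nameList[1:], then insert the head with a per-character loop and a substring test) is replaced by a single iterative back-to-front pass that inserts each name with a generator-sum count against a precomputed consonant set.
import Mathlib
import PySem

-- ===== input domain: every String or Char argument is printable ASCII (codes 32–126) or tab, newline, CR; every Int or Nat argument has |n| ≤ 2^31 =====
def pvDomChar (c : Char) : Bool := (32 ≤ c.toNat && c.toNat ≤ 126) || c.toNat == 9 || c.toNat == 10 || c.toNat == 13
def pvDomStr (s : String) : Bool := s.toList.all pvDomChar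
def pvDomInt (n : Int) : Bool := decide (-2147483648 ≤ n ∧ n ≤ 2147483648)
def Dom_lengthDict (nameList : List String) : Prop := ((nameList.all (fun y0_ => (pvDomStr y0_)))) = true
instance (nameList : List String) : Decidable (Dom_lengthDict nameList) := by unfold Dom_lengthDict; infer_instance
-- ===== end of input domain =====

-- B replaces A's recursion over the list tail (building the dict after the recursive call
-- returns) by a single iterative back-to-front pass with a set of consonants; objective: simpler.

-- ===== PORT A =====
-- the consonant alphabet, as in A's string literal
def pvConsA : List Char := "bcdfghjklmnpqrstvwxyz".toList

-- recursive dict builder, step for step as A (slice nameList[1:] is the tail)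
def lengthDictA : List String → PySem.Dict String Int
  | [] => PySem.Dict.empty
  | name :: rest =>
      -- counter loop: 'if char.lower() in "bcdfg…": counter += 1'
      let counter : Int := name.toList.foldl
        (fun c ch => if PySem.Chars.isIn [PySem.Chars.lowerChar ch] pvConsA then c + 1 else c) 0
      let interDict := lengthDictA rest
      interDict.insert name counter

def lengthDict (nameList : List String) : List (String × Int) :=
  (lengthDictA nameList).items

-- ===== PORT B =====
-- consonants = set("bcdfghjklmnpqrstvwxyz")
def pvConsB : PySem.Set Char := PySem.Set.ofList "bcdfghjklmnpqrstvwxyz".toList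

-- sum(1 for ch in name if ch.lower() in consonants)
def pvCountB (name : String) : Int :=
  (name.toList.countP (fun ch => PySem.Set.contains pvConsB (PySem.Chars.lowerChar ch)) : Int)

def lengthDict_alt (nameList : List String) : List (String × Int) :=
  (nameList.reverse.foldl (fun d name => d.insert name (pvCountB name)) PySem.Dict.empty).items

-- ===== PRECONDITION & SPEC =====
def Spec_lengthDict (nameList : List String) (out : List (String × Int)) : Prop := out = lengthDict_alt nameList
instance (nameList : List String) (out : List (String × Int)) : Decidable (Spec_lengthDict nameList out) := by unfold Spec_lengthDict; infer_instance

-- ===== CLAIM (what is proved, stated in full; the proofs are below) =====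
def Claim_equal_lengthDict : Prop := ∀ (nameList : List String), Dom_lengthDict nameList → Spec_lengthDict nameList (lengthDict nameList)

-- ===== LEMMAS AND PROOFS =====

-- the two consonant tests agree on every character
theorem pvCons_test_eq (c : Char) :
    PySem.Chars.isIn [c] pvConsA = PySem.Set.contains pvConsB c := by
  rw [Bool.eq_iff_iff]
  simp [PySem.Chars.isIn_iff_infix, List.singleton_infix_iff, PySem.Set.contains, pvConsA, pvConsB,
    PySem.Set.mem_ofList]

-- the two per-name counts agree
theorem pvCount_eq (name : String) :
    name.toList.foldl
      (fun c ch => if PySem.Chars.isIn [PySem.Chars.lowerChar ch] pvConsA then c + 1 else c) 0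
      = pvCountB name := by
  rw [PySem.List.foldl_if_add_one]
  unfold pvCountB
  rw [List.countP_congr (fun ch _ => by rw [pvCons_test_eq])]
  simp

-- the two dict builders agree
theorem pvDict_eq (l : List String) :
    lengthDictA l = l.reverse.foldl (fun d name => d.insert name (pvCountB name)) PySem.Dict.empty := by
  induction l with
  | nil => rfl
  | cons x r ih =>
      simp only [List.reverse_cons, List.foldl_append, List.foldl_cons, List.foldl_nil]
      rw [lengthDictA, ← ih, pvCount_eq]

-- ===== VERDICT (by name: the statement is the Claim_ definition above) =====
theorem lengthDict_spec : Claim_equal_lengthDict := by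
  intro nameList _
  unfold Spec_lengthDict lengthDict lengthDict_alt
  rw [pvDict_eq]
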